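-- pv_equiv track=rewrite | github.com/acmpesuecc/traffic_simulation | visualize.py | calc_weight
-- ===== SOURCE A (Python) =====
-- number_of_cars_time = {10:1, 20:2, 30:4, 40:8, 50:16, 60:32, 70:64, 80:128, 90:256}
--
-- def calc_weight(ele_dist, no_of_car):
--     """Calculate edge weight based on distance and traffic congestion"""
--     t = 0
--     for threshold, penalty in sorted(number_of_cars_time.items()):
--         if no_of_car < threshold:
--             t = penalty
--             break
--     if t == 0:
--         t = list(number_of_cars_time.values())[-1]
--     weight = ele_dist[2] + t
--     return weight
-- ===== SOURCE B (Python) =====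
-- def calc_weight(ele_dist, no_of_car):
--     """Calculate edge weight based on distance and traffic congestion"""
--     k = min(max(no_of_car // 10, 0), 8)
--     return ele_dist[2] + (1 << k)
-- ===== Notes on version B (the rewrite author's own statement) =====
-- stated objective: simpler
-- what changed: Replaces the sorted-dict scan with a break and the fallback-to-last-value step by a closed form: clamp the decade index k = min(max(no_of_car // 10, 0), 8) and add 1 << k, since thresholds are decades and penalties are powers of two.
import Mathlib
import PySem

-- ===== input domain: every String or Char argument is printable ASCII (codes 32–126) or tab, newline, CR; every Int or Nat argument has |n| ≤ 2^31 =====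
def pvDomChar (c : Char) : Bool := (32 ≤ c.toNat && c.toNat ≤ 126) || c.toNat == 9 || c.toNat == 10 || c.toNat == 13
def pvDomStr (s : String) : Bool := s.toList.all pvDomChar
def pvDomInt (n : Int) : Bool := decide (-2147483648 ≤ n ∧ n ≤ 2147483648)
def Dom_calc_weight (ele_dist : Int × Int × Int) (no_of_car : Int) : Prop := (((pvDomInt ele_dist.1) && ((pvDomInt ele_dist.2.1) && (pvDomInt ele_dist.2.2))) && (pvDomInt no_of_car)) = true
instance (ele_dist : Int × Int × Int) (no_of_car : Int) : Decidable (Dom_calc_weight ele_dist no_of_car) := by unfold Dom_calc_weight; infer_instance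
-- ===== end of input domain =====

-- B replaces A's sorted-table scan by the closed form ele_dist[2] + 2^clamp(no_of_car//10, 0, 8) (objective: simpler).

-- ===== PORT A =====
-- number_of_cars_time dict as an association list in insertion order
def number_of_cars_time : List (Int × Int) :=
  [(10,1),(20,2),(30,4),(40,8),(50,16),(60,32),(70,64),(80,128),(90,256)]

-- the for-loop with break: first (threshold, penalty) with no_of_car < threshold sets t; else t stays 0
def calcWeightLoop (no_of_car : Int) : List (Int × Int) → Int
  | [] => 0
  | (threshold, penalty) :: rest =>
      if no_of_car < threshold then penalty else calcWeightLoop no_of_car rest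

def calc_weight (ele_dist : Int × Int × Int) (no_of_car : Int) : Int :=
  let t := calcWeightLoop no_of_car (-- sorted(items): sort by threshold; keys are distinct so this equals Python's tuple sort
    PySem.List.sorted number_of_cars_time (fun p => p.1))
  let t := if t = 0 then ((PySem.List.pyGet? (number_of_cars_time.map Prod.snd) (-1)).getD 0) else t
  ele_dist.2.2 + t

-- ===== PORT B =====
def calc_weight_alt (ele_dist : Int × Int × Int) (no_of_car : Int) : Int :=
  let k := min (max (PySem.Int.floordiv no_of_car 10) 0) 8
  ele_dist.2.2 + 2 ^ k.toNat

-- ===== PRECONDITION & SPEC =====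
def Spec_calc_weight (ele_dist : Int × Int × Int) (no_of_car : Int) (out : Int) : Prop := out = calc_weight_alt ele_dist no_of_car
instance (ele_dist : Int × Int × Int) (no_of_car : Int) (out : Int) : Decidable (Spec_calc_weight ele_dist no_of_car out) := by unfold Spec_calc_weight; infer_instance

-- ===== CLAIM (what is proved, stated in full; the proofs are below) =====
def Claim_equal_calc_weight : Prop := ∀ (ele_dist : Int × Int × Int) (no_of_car : Int), Dom_calc_weight ele_dist no_of_car → Spec_calc_weight ele_dist no_of_car (calc_weight ele_dist no_of_car)

-- ===== LEMMAS AND PROOFS =====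

-- ===== VERDICT (by name: the statement is the Claim_ definition above) =====
theorem calc_weight_spec : Claim_equal_calc_weight := by
  intro ele n _
  unfold Spec_calc_weight
  have hs : PySem.List.sorted number_of_cars_time (fun p => p.1) = number_of_cars_time := by
    decide
  have hlast : (PySem.List.pyGet? (number_of_cars_time.map Prod.snd) (-1)).getD 0 = 256 := by
    decide
  unfold calc_weight calc_weight_alt
  rw [hs, hlast]
  simp only [number_of_cars_time, calcWeightLoop]
  obtain ⟨hq, hr0, hr10⟩ : PySem.Int.floordiv n 10 * 10 + PySem.Int.mod n 10 = n ∧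
      0 ≤ PySem.Int.mod n 10 ∧ PySem.Int.mod n 10 < 10 :=
    ⟨PySem.Int.floordiv_mul_add_mod n 10, PySem.Int.mod_nonneg n (by norm_num),
     PySem.Int.mod_lt n (by norm_num)⟩
  set q := PySem.Int.floordiv n 10 with hqdef
  set r := PySem.Int.mod n 10 with hrdef
  rcases show q ≤ 0 ∨ q = 1 ∨ q = 2 ∨ q = 3 ∨ q = 4 ∨ q = 5 ∨ q = 6 ∨ q = 7 ∨ q = 8 ∨ 9 ≤ q by omega
    with h | h | h | h | h | h | h | h | h | h
  · rw [show (min (max q 0) 8).toNat = 0 from by omega]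
    have b10 : n < 10 := by omega
    norm_num [b10]
  · rw [show (min (max q 0) 8).toNat = 1 from by omega]
    have nb10 : ¬ n < 10 := by omega
    have b20 : n < 20 := by omega
    norm_num [nb10, b20]
  · rw [show (min (max q 0) 8).toNat = 2 from by omega]
    have nb10 : ¬ n < 10 := by omega
    have nb20 : ¬ n < 20 := by omega
    have b30 : n < 30 := by omega
    norm_num [nb10, nb20, b30]
  · rw [show (min (max q 0) 8).toNat = 3 from by omega]
    have nb10 : ¬ n < 10 := by omega
    have nb20 : ¬ n < 20 := by omega
    have nb30 : ¬ n < 30 := by omega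
    have b40 : n < 40 := by omega
    norm_num [nb10, nb20, nb30, b40]
  · rw [show (min (max q 0) 8).toNat = 4 from by omega]
    have nb10 : ¬ n < 10 := by omega
    have nb20 : ¬ n < 20 := by omega
    have nb30 : ¬ n < 30 := by omega
    have nb40 : ¬ n < 40 := by omega
    have b50 : n < 50 := by omega
    norm_num [nb10, nb20, nb30, nb40, b50]
  · rw [show (min (max q 0) 8).toNat = 5 from by omega]
    have nb10 : ¬ n < 10 := by omega
    have nb20 : ¬ n < 20 := by omega
    have nb30 : ¬ n < 30 := by omega
    have nb40 : ¬ n < 40 := by omega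
    have nb50 : ¬ n < 50 := by omega
    have b60 : n < 60 := by omega
    norm_num [nb10, nb20, nb30, nb40, nb50, b60]
  · rw [show (min (max q 0) 8).toNat = 6 from by omega]
    have nb10 : ¬ n < 10 := by omega
    have nb20 : ¬ n < 20 := by omega
    have nb30 : ¬ n < 30 := by omega
    have nb40 : ¬ n < 40 := by omega
    have nb50 : ¬ n < 50 := by omega
    have nb60 : ¬ n < 60 := by omega
    have b70 : n < 70 := by omega
    norm_num [nb10, nb20, nb30, nb40, nb50, nb60, b70]
  · rw [show (min (max q 0) 8).toNat = 7 from by omega]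
    have nb10 : ¬ n < 10 := by omega
    have nb20 : ¬ n < 20 := by omega
    have nb30 : ¬ n < 30 := by omega
    have nb40 : ¬ n < 40 := by omega
    have nb50 : ¬ n < 50 := by omega
    have nb60 : ¬ n < 60 := by omega
    have nb70 : ¬ n < 70 := by omega
    have b80 : n < 80 := by omega
    norm_num [nb10, nb20, nb30, nb40, nb50, nb60, nb70, b80]
  · rw [show (min (max q 0) 8).toNat = 8 from by omega]
    have nb10 : ¬ n < 10 := by omega
    have nb20 : ¬ n < 20 := by omega
    have nb30 : ¬ n < 30 := by omega
    have nb40 : ¬ n < 40 := by omega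
    have nb50 : ¬ n < 50 := by omega
    have nb60 : ¬ n < 60 := by omega
    have nb70 : ¬ n < 70 := by omega
    have nb80 : ¬ n < 80 := by omega
    have b90 : n < 90 := by omega
    norm_num [nb10, nb20, nb30, nb40, nb50, nb60, nb70, nb80, b90]
  · rw [show (min (max q 0) 8).toNat = 8 from by omega]
    have nb10 : ¬ n < 10 := by omega
    have nb20 : ¬ n < 20 := by omega
    have nb30 : ¬ n < 30 := by omega
    have nb40 : ¬ n < 40 := by omega
    have nb50 : ¬ n < 50 := by omega
    have nb60 : ¬ n < 60 := by omega
    have nb70 : ¬ n < 70 := by omega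
    have nb80 : ¬ n < 80 := by omega
    have nb90 : ¬ n < 90 := by omega
    norm_num [nb10, nb20, nb30, nb40, nb50, nb60, nb70, nb80, nb90]
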